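-- pv_equiv track=rewrite | github.com/arrora09/adatorientaltprog | lab04/hw/palindrome2.py | isPalindromeRec
-- ===== SOURCE A (Python) =====
-- def isPalindromeRec(s):
--     s = s.lower()
--     s = s.replace(" ", "")
--     if len(s) < 2:
--         return True
--
--     if s[0] != s[-1]:
--         return False
--     else:
--         return isPalindromeRec(s[1:-1])
-- ===== SOURCE B (Python) =====
-- def isPalindromeRec(s):
--     t = s.lower().replace(" ", "")
--     return t == t[::-1]
-- ===== Notes on version B (the rewrite author's own statement) =====
-- stated objective: faster
-- what changed: Replaces the recursion that re-lowercases, re-strips and slices the string at every level with a single preprocessing pass followed by one reversed-string comparison.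
import Mathlib
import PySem

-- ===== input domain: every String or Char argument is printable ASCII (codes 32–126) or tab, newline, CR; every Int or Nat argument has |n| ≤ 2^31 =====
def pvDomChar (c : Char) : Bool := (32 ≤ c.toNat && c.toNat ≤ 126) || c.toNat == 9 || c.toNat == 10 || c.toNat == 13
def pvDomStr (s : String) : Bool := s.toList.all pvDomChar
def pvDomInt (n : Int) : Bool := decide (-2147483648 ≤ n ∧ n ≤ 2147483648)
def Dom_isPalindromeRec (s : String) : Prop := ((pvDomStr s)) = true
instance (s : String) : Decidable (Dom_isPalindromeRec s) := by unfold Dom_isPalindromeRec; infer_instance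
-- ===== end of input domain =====

-- B preprocesses the string once and compares it with its reverse, instead of A's recursion
-- that re-lowercases, re-strips spaces and slices the string at every level.

-- ===== PORT A =====
-- The next four lemmas are cited by the port's decreasing_by (termination of A's recursion).
-- replace(s, " ", "") removes exactly the spaces
theorem pvReplaceSpaceFilter (t : List Char) :
    PySem.Chars.replace t [' '] [] = t.filter (fun c => c != ' ') := by
  have go : ∀ (fuel : Nat) (l acc : List Char), l.length ≤ fuel →
      PySem.Chars.replace.go [' '] [] fuel l acc
        = acc.reverse ++ l.filter (fun c => c != ' ') := by
    intro fuel
    induction fuel with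
    | zero =>
      intro l acc h
      have : l = [] := List.eq_nil_of_length_eq_zero (Nat.le_zero.mp h)
      subst this
      simp [PySem.Chars.replace.go]
    | succ n ih =>
      intro l acc h
      cases l with
      | nil => simp [PySem.Chars.replace.go]
      | cons c t =>
        rw [PySem.Chars.replace.go]
        by_cases hc : c = ' '
        · subst hc
          rw [if_pos (by simp [List.isPrefixOf])]
          simp only [List.length, List.drop_succ_cons, List.drop_zero, List.reverse_nil,
            List.nil_append] at *
          rw [ih t acc (by omega)]
          simp
        · rw [if_neg (by simp [List.isPrefixOf]; exact fun h => absurd h.symm hc)]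
          rw [ih t (c :: acc) (by simpa using Nat.le_of_succ_le_succ h)]
          simp [hc]
  simp only [PySem.Chars.replace, List.isEmpty_cons]
  exact go t.length t [] le_rfl

-- the processed string is no longer than the input
theorem pvProcLen (cs : List Char) :
    (PySem.Chars.replace (PySem.Chars.lower cs) [' '] []).length ≤ cs.length := by
  rw [pvReplaceSpaceFilter]
  calc ((PySem.Chars.lower cs).filter (fun c => c != ' ')).length
      ≤ (PySem.Chars.lower cs).length := List.length_filter_le _ _
    _ = cs.length := by simp [PySem.Chars.lower]

-- s[1:-1] drops exactly the first and last character
theorem pvSliceMid (a b : Char) (mid : List Char) :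
    PySem.List.slice (a :: (mid ++ [b])) (some 1) (some (-1)) = mid := by
  simp only [PySem.List.slice, PySem.List.clampIdx]
  norm_num
  rw [if_neg (by omega)]
  simp

-- l = first :: middle ++ [last] whenever 2 ≤ l.length (reads s[0], s[-1], s[1:-1])
theorem pvDecomp (l : List Char) (h : 2 ≤ l.length) :
    ∃ a mid b, l = a :: (mid ++ [b]) := by
  cases l with
  | nil => simp at h
  | cons a t =>
    have ht : t ≠ [] := by intro h0; rw [h0] at h; simp at h
    exact ⟨a, t.dropLast, t.getLast ht, by rw [List.dropLast_append_getLast ht]⟩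

def isPalindromeRecChars (cs : List Char) : Bool :=
  let t := PySem.Chars.replace (PySem.Chars.lower cs) [' '] []   -- s = s.lower(); s = s.replace(" ", "")
  if t.length < 2 then true
  else if PySem.List.pyGet? t 0 ≠ PySem.List.pyGet? t (-1) then false   -- s[0] != s[-1] (both indices in range here)
  else isPalindromeRecChars (PySem.List.slice t (some 1) (some (-1)))   -- s[1:-1]
termination_by cs.length
decreasing_by
  rename_i h _
  have h2 : 2 ≤ (PySem.Chars.replace (PySem.Chars.lower cs) [' '] []).length := by
    simpa [t] using h
  obtain ⟨a, mid, b, ht⟩ := pvDecomp _ h2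
  have hl : (PySem.Chars.replace (PySem.Chars.lower cs) [' '] []).length = mid.length + 2 := by
    rw [ht]; simp
  have := pvProcLen cs
  rw [ht, pvSliceMid]
  omega

def isPalindromeRec (s : String) : Bool := isPalindromeRecChars s.toList

-- ===== PORT B =====
def isPalindromeRec_alt (s : String) : Bool :=
  let t := PySem.Chars.replace (PySem.Chars.lower s.toList) [' '] []   -- t = s.lower().replace(" ", "")
  decide (t = (PySem.List.slice? t none none (-1)).getD [])            -- t == t[::-1] (step -1 ≠ 0, so getD never fires)

-- ===== PRECONDITION & SPEC =====
def Spec_isPalindromeRec (s : String) (out : Bool) : Prop := out = isPalindromeRec_alt s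
instance (s : String) (out : Bool) : Decidable (Spec_isPalindromeRec s out) := by unfold Spec_isPalindromeRec; infer_instance

-- ===== CLAIM (what is proved, stated in full; the proofs are below) =====
def Claim_equal_isPalindromeRec : Prop := ∀ (s : String), Dom_isPalindromeRec s → Spec_isPalindromeRec s (isPalindromeRec s)

-- ===== LEMMAS AND PROOFS =====
theorem pvCharLe (c d : Char) : c ≤ d ↔ c.toNat ≤ d.toNat := by
  rw [Char.le_def, UInt32.le_iff_toNat_le]; rfl

theorem pvLowerCharIdem (c : Char) :
    PySem.Chars.lowerChar (PySem.Chars.lowerChar c) = PySem.Chars.lowerChar c := by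
  simp only [PySem.Chars.lowerChar, PySem.Chars.isupper, Bool.and_eq_true, decide_eq_true_eq]
  split_ifs with h1 h2
  · exfalso
    obtain ⟨h1a, h1b⟩ := h1
    obtain ⟨h2a, h2b⟩ := h2
    rw [pvCharLe] at h1a h1b h2a h2b
    have hA : (Char.toNat 'A') = 65 := by decide
    have hZ : (Char.toNat 'Z') = 90 := by decide
    have hv : (Char.ofNat (c.toNat + 32)).toNat = c.toNat + 32 := by
      rw [Char.toNat_ofNat, if_pos]
      left; omega
    omega
  · rfl
  · rfl

-- elements of the processed string are space-free fixed points of lowerChar …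
theorem pvProcMem (cs : List Char) (c : Char)
    (hc : c ∈ PySem.Chars.replace (PySem.Chars.lower cs) [' '] []) :
    PySem.Chars.lowerChar c = c ∧ c ≠ ' ' := by
  rw [pvReplaceSpaceFilter] at hc
  have hkeep := List.of_mem_filter hc
  have hm := List.mem_of_mem_filter hc
  simp only [PySem.Chars.lower] at hm
  obtain ⟨x, _, rfl⟩ := List.mem_map.mp hm
  exact ⟨pvLowerCharIdem x, by simpa using hkeep⟩

-- … and on such strings the preprocessing is the identity
theorem pvProcFixed (u : List Char)
    (h : ∀ c ∈ u, PySem.Chars.lowerChar c = c ∧ c ≠ ' ') :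
    PySem.Chars.replace (PySem.Chars.lower u) [' '] [] = u := by
  rw [pvReplaceSpaceFilter]
  have hmap : PySem.Chars.lower u = u := by
    simp only [PySem.Chars.lower]
    conv_rhs => rw [show u = u.map id from (List.map_id u).symm]
    exact List.map_congr_left (fun c hc => (h c hc).1)
  rw [hmap]
  exact List.filter_eq_self.mpr (fun c hc => by simpa using (h c hc).2)

-- key characterisation of A's recursion: it decides whether the processed string is its own reverse
theorem pvKeyAux (n : Nat) : ∀ cs : List Char, cs.length ≤ n →
    isPalindromeRecChars cs
      = decide ((PySem.Chars.replace (PySem.Chars.lower cs) [' '] [])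
          = (PySem.Chars.replace (PySem.Chars.lower cs) [' '] []).reverse) := by
  induction n with
  | zero =>
    intro cs hn
    have h0 : cs = [] := List.eq_nil_of_length_eq_zero (Nat.le_zero.mp hn)
    subst h0
    rw [isPalindromeRecChars]
    rfl
  | succ n ih =>
    intro cs hn
    rw [isPalindromeRecChars]
    set t := PySem.Chars.replace (PySem.Chars.lower cs) [' '] [] with htdef
    by_cases hlen : t.length < 2
    · rw [if_pos hlen]
      symm
      rw [decide_eq_true_iff]
      match t, hlen with
      | [], _ => rfl
      | [a], _ => rfl
    · rw [if_neg hlen]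
      obtain ⟨a, mid, b, ht⟩ := pvDecomp t (by omega)
      have hget0 : PySem.List.pyGet? t 0 = some a := by
        rw [ht]; simp [PySem.List.pyGet?, PySem.List.pyIdx?]
        rw [if_pos (by positivity)]
        simp
      have hgetm1 : PySem.List.pyGet? t (-1) = some b := by
        rw [ht]; simp [PySem.List.pyGet?, PySem.List.pyIdx?]
      have hmid : ∀ c ∈ mid, PySem.Chars.lowerChar c = c ∧ c ≠ ' ' := by
        intro c hc
        exact pvProcMem cs c (by rw [← htdef, ht]; simp [hc])
      by_cases hab : a = b
      · rw [if_neg (by simp [hget0, hgetm1, hab])]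
        have hlenmid : mid.length ≤ n := by
          have h1 : t.length ≤ cs.length := pvProcLen cs
          have h2 : t.length = mid.length + 2 := by rw [ht]; simp
          omega
        rw [ht, pvSliceMid, ih mid hlenmid, pvProcFixed mid hmid]
        subst hab
        have hr : (a :: (mid ++ [a])).reverse = a :: (mid.reverse ++ [a]) := by simp
        rw [hr]
        simp only [decide_eq_decide]
        constructor
        · intro h; rw [List.cons.injEq]; exact ⟨rfl, by rw [← h]⟩
        · intro h; rw [List.cons.injEq] at h; exact (List.append_left_inj [a]).mp h.2
      · rw [if_pos (by simp [hget0, hgetm1, hab])]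
        symm
        rw [decide_eq_false_iff_not]
        have hr : (a :: (mid ++ [b])).reverse = b :: (mid.reverse ++ [a]) := by simp
        rw [ht, hr]
        intro h
        rw [List.cons.injEq] at h
        exact hab h.1

-- ===== VERDICT (by name: the statement is the Claim_ definition above) =====
theorem isPalindromeRec_spec : Claim_equal_isPalindromeRec := by
  intro s _
  unfold Spec_isPalindromeRec isPalindromeRec isPalindromeRec_alt
  simp only [PySem.List.slice?_none_none_neg_one, Option.getD_some]
  exact pvKeyAux s.toList.length s.toList le_rfl
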